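-- pv_equiv track=rewrite | github.com/Fiononana-Jaofera/medicine_generation_backend | apis/algo.py | allwords
-- ===== SOURCE A (Python) =====
-- def allwords(M, res, lst, n, seuil):
--     if max(seuil)<=0 or n==0:
--         res.append(lst)
--     else:
--         lst_s = seuil.copy()
--         for m, e in M.items():
--             if max(e)==0:
--                 continue
--             seuil = lst_s.copy()
--             for i in range(len(seuil)):
--                 seuil[i]-=e[i]
--             temp = lst + [m]
--             if min(seuil)<0 and max(seuil)==max(lst_s):
--                 continue
--             res_t = allwords(M, res, temp, n-1, seuil)
--             res = res_t
--     return res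
-- ===== SOURCE B (Python) =====
-- def allwords(M, res, lst, n, seuil):
--     # Iterative DFS with an explicit stack (pre-order = A's recursion order).
--     # Like A, appends to res in place and returns it.
--     stack = [(lst, n, seuil)]
--     while stack:
--         lst, n, seuil = stack.pop()
--         if max(seuil) <= 0 or n == 0:
--             res.append(lst)
--             continue
--         children = []
--         for m, e in M.items():
--             if max(e) == 0:
--                 continue
--             s2 = [seuil[i] - e[i] for i in range(len(seuil))]
--             if min(s2) < 0 and max(s2) == max(seuil):
--                 continue
--             children.append((lst + [m], n - 1, s2))
--         stack.extend(reversed(children))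
--     return res
-- ===== Notes on version B (the rewrite author's own statement) =====
-- stated objective: alternative
-- what changed: A's recursive backtracking is replaced by an iterative pre-order DFS over an explicit stack of (lst, n, seuil) states, collecting each node's valid children in one pass and pushing them in reverse so LIFO popping reproduces A's output order.
-- outside the precondition, e.g. on allwords({'a': [1]}, [], [], -1, [1]): A returns [['a']], B returns [['a']]
import Mathlib
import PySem

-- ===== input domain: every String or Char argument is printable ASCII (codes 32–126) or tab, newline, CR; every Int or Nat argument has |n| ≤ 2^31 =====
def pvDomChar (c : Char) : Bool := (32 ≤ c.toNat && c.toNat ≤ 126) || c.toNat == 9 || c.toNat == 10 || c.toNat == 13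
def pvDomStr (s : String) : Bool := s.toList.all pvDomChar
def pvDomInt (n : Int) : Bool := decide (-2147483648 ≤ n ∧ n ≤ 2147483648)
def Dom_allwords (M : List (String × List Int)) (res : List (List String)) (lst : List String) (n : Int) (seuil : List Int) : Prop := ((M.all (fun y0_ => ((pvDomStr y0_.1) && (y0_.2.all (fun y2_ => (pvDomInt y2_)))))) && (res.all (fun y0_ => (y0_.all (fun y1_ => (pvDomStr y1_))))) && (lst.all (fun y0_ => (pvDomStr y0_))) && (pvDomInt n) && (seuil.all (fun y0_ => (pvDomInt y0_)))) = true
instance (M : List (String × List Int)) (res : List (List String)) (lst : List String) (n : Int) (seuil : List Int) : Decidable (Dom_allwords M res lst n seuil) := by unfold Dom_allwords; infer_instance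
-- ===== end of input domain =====

-- B replaces A's recursion by an explicit-stack iterative DFS (same output order); both
-- mutate res in place in Python (append); the equivalence proved here is about the return value.


-- Python max/min on a nonempty list of ints (Pre_ keeps the lists nonempty, so the default is never relevant inside Pre_)
def pyMax (l : List Int) : Int := match l with | [] => 0 | x :: xs => xs.foldl max x
def pyMin (l : List Int) : Int := match l with | [] => 0 | x :: xs => xs.foldl min x

-- ===== PORT A =====
-- A's recursion; the fuel argument (n.toNat+1 at the top level) is only a totality guard: inside
-- Pre_ (0 ≤ n, or an immediate base case) it is never exhausted, since the depth is bounded by n.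
def allwordsA (M : List (String × List Int)) : Nat → List (List String) → List String → Int → List Int → List (List String)
  | 0, res, _, _, _ => res
  | fuel+1, res, lst, n, seuil =>
    if pyMax seuil ≤ 0 ∨ n = 0 then res ++ [lst]
    else
      let lst_s := seuil
      M.foldl (fun res me =>
        if pyMax me.2 = 0 then res
        else
          let seuil2 := (List.range lst_s.length).map (fun i => lst_s.getD i 0 - me.2.getD i 0)
          let temp := lst ++ [me.1]
          if pyMin seuil2 < 0 ∧ pyMax seuil2 = pyMax lst_s then res
          else allwordsA M fuel res temp (n-1) seuil2) res

def allwords (M : List (String × List Int)) (res : List (List String)) (lst : List String) (n : Int) (seuil : List Int) : List (List String) :=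
  allwordsA M (n.toNat + 1) res lst n seuil

-- ===== PORT B =====
-- B's inner for-loop collecting the valid children of one state
def allwordsChildren (M : List (String × List Int)) (lst : List String) (n : Int) (seuil : List Int) : List (List String × Int × List Int) :=
  M.foldl (fun acc me =>
    if pyMax me.2 = 0 then acc
    else
      let s2 := (List.range seuil.length).map (fun i => seuil.getD i 0 - me.2.getD i 0)
      if pyMin s2 < 0 ∧ pyMax s2 = pyMax seuil then acc
      else acc ++ [(lst ++ [me.1], n - 1, s2)]) []

-- B's while-loop; head of the list = top of the stack; reversed children are pushed one by one
-- (the foldl), exactly as Source B's stack.extend(reversed(children)). Fuel is only a totality guard.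
def allwordsB (M : List (String × List Int)) : Nat → List (List String) → List (List String × Int × List Int) → List (List String)
  | 0, res, _ => res
  | _+1, res, [] => res
  | fuel+1, res, (lst, n, seuil) :: rest =>
    if pyMax seuil ≤ 0 ∨ n = 0 then allwordsB M fuel (res ++ [lst]) rest
    else
      allwordsB M fuel res (((allwordsChildren M lst n seuil).reverse).foldl (fun st c => c :: st) rest)

def allwords_alt (M : List (String × List Int)) (res : List (List String)) (lst : List String) (n : Int) (seuil : List Int) : List (List String) :=
  allwordsB M ((M.length + 1) ^ (n.toNat + 1) + 1) res [(lst, n, seuil)]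

-- ===== PRECONDITION & SPEC =====
-- Pre_ = inputs on which the Python A returns: seuil nonempty (max([]) raises ValueError), every
-- value of the dict M nonempty and at least as long as seuil (max(e) / e[i] raise otherwise), keys
-- of the dict M distinct (M is a Python dict), and 0 ≤ n unless the very first call is a base case:
-- for n < 0 with max(seuil) > 0 the recursion depth is not bounded by n and A can exhaust the
-- recursion limit; this does exclude some inputs (with thresholds that die out) on which A returns
-- — there B returns the same value (see cites).
def Pre_allwords (M : List (String × List Int)) (res : List (List String)) (lst : List String) (n : Int) (seuil : List Int) : Prop :=
  seuil ≠ [] ∧ (0 ≤ n ∨ pyMax seuil ≤ 0) ∧ (∀ me ∈ M, me.2 ≠ [] ∧ seuil.length ≤ me.2.length) ∧ (M.map Prod.fst).Nodup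
instance (M : List (String × List Int)) (res : List (List String)) (lst : List String) (n : Int) (seuil : List Int) : Decidable (Pre_allwords M res lst n seuil) := by unfold Pre_allwords; infer_instance

def pvWitness_allwords : (List (String × List Int)) × List (List String) × List String × Int × List Int :=
  ([("a", [1]), ("b", [2])], [], [], 2, [2])

def Spec_allwords (M : List (String × List Int)) (res : List (List String)) (lst : List String) (n : Int) (seuil : List Int) (out : List (List String)) : Prop := out = allwords_alt M res lst n seuil
instance (M : List (String × List Int)) (res : List (List String)) (lst : List String) (n : Int) (seuil : List Int) (out : List (List String)) : Decidable (Spec_allwords M res lst n seuil out) := by unfold Spec_allwords; infer_instance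

-- ===== CLAIM (what is proved, stated in full; the proofs are below) =====
def Claim_equal_allwords : Prop := ∀ (M : List (String × List Int)) (res : List (List String)) (lst : List String) (n : Int) (seuil : List Int), Dom_allwords M res lst n seuil → Pre_allwords M res lst n seuil → Spec_allwords M res lst n seuil (allwords M res lst n seuil)

-- ===== LEMMAS AND PROOFS =====

theorem pvWitness_ok : Dom_allwords pvWitness_allwords.1 pvWitness_allwords.2.1 pvWitness_allwords.2.2.1 pvWitness_allwords.2.2.2.1 pvWitness_allwords.2.2.2.2 ∧ Pre_allwords pvWitness_allwords.1 pvWitness_allwords.2.1 pvWitness_allwords.2.2.1 pvWitness_allwords.2.2.2.1 pvWitness_allwords.2.2.2.2 := by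
  decide

-- pushing the reversed children one by one = prepending the children
theorem foldl_ext_mem {α β : Type} {f g : β → α → β} {l : List α} {b : β}
    (h : ∀ b a, a ∈ l → f b a = g b a) : l.foldl f b = l.foldl g b := by
  induction l generalizing b with
  | nil => rfl
  | cons a t ih =>
    simp only [List.foldl_cons, h b a (List.mem_cons_self ..)]
    exact ih (fun b x hx => h b x (List.mem_cons_of_mem _ hx))

theorem foldl_push_reverse {α : Type} (l rest : List α) :
    (l.reverse).foldl (fun st c => c :: st) rest = l ++ rest := by
  induction l generalizing rest with
  | nil => rfl
  | cons a t ih =>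
    simp only [List.reverse_cons, List.foldl_append, List.foldl_cons, List.foldl_nil, ih]
    rfl

-- every child produced by allwordsChildren carries n-1
theorem children_n (M : List (String × List Int)) (lst : List String) (n : Int) (seuil : List Int) :
    ∀ c ∈ allwordsChildren M lst n seuil, c.2.1 = n - 1 := by
  unfold allwordsChildren
  suffices h : ∀ (L : List (String × List Int)) (acc : List (List String × Int × List Int)),
      (∀ c ∈ acc, c.2.1 = n - 1) →
      ∀ c ∈ L.foldl (fun acc me =>
        if pyMax me.2 = 0 then acc
        else
          let s2 := (List.range seuil.length).map (fun i => seuil.getD i 0 - me.2.getD i 0)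
          if pyMin s2 < 0 ∧ pyMax s2 = pyMax seuil then acc
          else acc ++ [(lst ++ [me.1], n - 1, s2)]) acc, c.2.1 = n - 1 by
    exact h M [] (by simp)
  intro L
  induction L with
  | nil => intro acc hacc; simpa using hacc
  | cons me t ih =>
    intro acc hacc
    simp only [List.foldl_cons]
    apply ih
    split
    · exact hacc
    · split
      · exact hacc
      · intro c hc
        rcases List.mem_append.1 hc with h | h
        · exact hacc c h
        · simp at h; simp [h]

-- the number of children is at most |M|
theorem children_len (M : List (String × List Int)) (lst : List String) (n : Int) (seuil : List Int) :
    (allwordsChildren M lst n seuil).length ≤ M.length := by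
  unfold allwordsChildren
  suffices h : ∀ (L : List (String × List Int)) (acc : List (List String × Int × List Int)),
      (L.foldl (fun acc me =>
        if pyMax me.2 = 0 then acc
        else
          let s2 := (List.range seuil.length).map (fun i => seuil.getD i 0 - me.2.getD i 0)
          if pyMin s2 < 0 ∧ pyMax s2 = pyMax seuil then acc
          else acc ++ [(lst ++ [me.1], n - 1, s2)]) acc).length ≤ acc.length + L.length by
    simpa using h M []
  intro L
  induction L with
  | nil => intro acc; simp
  | cons me t ih =>
    intro acc
    simp only [List.foldl_cons, List.length_cons]
    refine le_trans (ih _) ?_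
    split
    · omega
    · split
      · omega
      · simp; omega

-- weight of a stack node / of a stack, for the fuel bound of B
def nodeWt (b : Nat) (c : List String × Int × List Int) : Nat := (b + 1) ^ (c.2.1.toNat + 1)
def stackWt (b : Nat) (stack : List (List String × Int × List Int)) : Nat := (stack.map (nodeWt b)).sum

-- fusion: folding A's recursive step over M = first building B's child list, then folding the
-- "recurse" continuation g over it (g applied with the child's own fuel n.toNat)
theorem children_fuse (M : List (String × List Int)) (lst : List String) (n : Int) (seuil : List Int)
    (g : List (List String) → (List String × Int × List Int) → List (List String)) (res : List (List String)) :
    (allwordsChildren M lst n seuil).foldl g res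
      = M.foldl (fun res me =>
          if pyMax me.2 = 0 then res
          else
            let s2 := (List.range seuil.length).map (fun i => seuil.getD i 0 - me.2.getD i 0)
            if pyMin s2 < 0 ∧ pyMax s2 = pyMax seuil then res
            else g res (lst ++ [me.1], n - 1, s2)) res := by
  unfold allwordsChildren
  suffices h : ∀ (L : List (String × List Int)) (acc : List (List String × Int × List Int)) (res : List (List String)),
      (L.foldl (fun acc me =>
        if pyMax me.2 = 0 then acc
        else
          let s2 := (List.range seuil.length).map (fun i => seuil.getD i 0 - me.2.getD i 0)
          if pyMin s2 < 0 ∧ pyMax s2 = pyMax seuil then acc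
          else acc ++ [(lst ++ [me.1], n - 1, s2)]) acc).foldl g res
      = L.foldl (fun res me =>
          if pyMax me.2 = 0 then res
          else
            let s2 := (List.range seuil.length).map (fun i => seuil.getD i 0 - me.2.getD i 0)
            if pyMin s2 < 0 ∧ pyMax s2 = pyMax seuil then res
            else g res (lst ++ [me.1], n - 1, s2)) (acc.foldl g res) by
    simpa using h M [] res
  intro L
  induction L with
  | nil => intro acc res; simp
  | cons me t ih =>
    intro acc res
    simp only [List.foldl_cons]
    rw [ih]
    congr 1
    split
    · rfl
    · split
      · rfl
      · simp

-- main invariant: with enough fuel, B's loop folds A's recursion over the stack, left to right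
theorem awB_spec (M : List (String × List Int)) :
    ∀ (f : Nat) (stack : List (List String × Int × List Int)) (res : List (List String)),
      (∀ c ∈ stack, 0 ≤ c.2.1) → stackWt M.length stack < f →
      allwordsB M f res stack
        = stack.foldl (fun res c => allwordsA M (c.2.1.toNat + 1) res c.1 c.2.1 c.2.2) res := by
  intro f
  induction f with
  | zero => intro stack res _ hw; omega
  | succ f ih =>
    intro stack res hpos hw
    match stack with
    | [] => rfl
    | (lst, n, seuil) :: rest =>
      have hnode : (1:Nat) ≤ nodeWt M.length (lst, n, seuil) := Nat.one_le_pow _ _ (by omega)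
      have hwrest : stackWt M.length rest < f := by
        simp only [stackWt, List.map_cons, List.sum_cons] at hw ⊢; omega
      by_cases hbase : pyMax seuil ≤ 0 ∨ n = 0
      · have : allwordsB M (f+1) res ((lst, n, seuil) :: rest) = allwordsB M f (res ++ [lst]) rest := by
          simp only [allwordsB, if_pos hbase]
        rw [this, ih rest (res ++ [lst]) (fun c hc => hpos c (List.mem_cons_of_mem _ hc)) hwrest]
        have hA : allwordsA M (n.toNat + 1) res lst n seuil = res ++ [lst] := by
          simp only [allwordsA, if_pos hbase]
        simp only [List.foldl_cons, hA]
      · have hn0 : 0 ≤ n := hpos _ (List.mem_cons_self ..)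
        have hn1 : 1 ≤ n := by
          rcases lt_or_eq_of_le hn0 with h | h
          · omega
          · exact absurd h.symm (fun h' => hbase (Or.inr h'))
        have hstep : allwordsB M (f+1) res ((lst, n, seuil) :: rest)
            = allwordsB M f res (allwordsChildren M lst n seuil ++ rest) := by
          simp only [allwordsB, if_neg hbase, foldl_push_reverse]
        rw [hstep]
        -- fuel bound for the new stack
        have hclen := children_len M lst n seuil
        have hcn := children_n M lst n seuil
        have hcw : stackWt M.length (allwordsChildren M lst n seuil)
            ≤ M.length * (M.length + 1) ^ n.toNat := by
          have : ∀ c ∈ allwordsChildren M lst n seuil,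
              nodeWt M.length c = (M.length + 1) ^ n.toNat := by
            intro c hc
            have := hcn c hc
            simp only [nodeWt, this]
            congr 1
            omega
          calc stackWt M.length (allwordsChildren M lst n seuil)
                = ((allwordsChildren M lst n seuil).map (fun _ => (M.length + 1) ^ n.toNat)).sum := by
                  unfold stackWt; exact congrArg List.sum (List.map_congr_left this)
            _ = (allwordsChildren M lst n seuil).length * (M.length + 1) ^ n.toNat := by
                  simp [List.map_const']
            _ ≤ M.length * (M.length + 1) ^ n.toNat := Nat.mul_le_mul_right _ hclen
        have hwnode : nodeWt M.length (lst, n, seuil) = (M.length + 1) ^ (n.toNat + 1) := rfl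
        have hpow1 : (1:Nat) ≤ (M.length + 1) ^ n.toNat := Nat.one_le_pow _ _ (by omega)
        have hdrop : stackWt M.length (allwordsChildren M lst n seuil ++ rest) < f := by
          have hsplit : stackWt M.length (allwordsChildren M lst n seuil ++ rest)
              = stackWt M.length (allwordsChildren M lst n seuil) + stackWt M.length rest := by
            simp [stackWt]
          have hexp : (M.length + 1) ^ (n.toNat + 1)
              = M.length * (M.length + 1) ^ n.toNat + (M.length + 1) ^ n.toNat := by
            rw [pow_succ]; ring
          simp only [stackWt, List.map_cons, List.sum_cons] at hw
          rw [hsplit]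
          have := hw
          rw [show (stackWt M.length rest = (rest.map (nodeWt M.length)).sum) from rfl] at *
          omega
        have hcpos : ∀ c ∈ allwordsChildren M lst n seuil ++ rest, 0 ≤ c.2.1 := by
          intro c hc
          rcases List.mem_append.1 hc with h | h
          · rw [hcn c h]; omega
          · exact hpos c (List.mem_cons_of_mem _ h)
        rw [ih _ res hcpos hdrop, List.foldl_append, List.foldl_cons]
        congr 1
        -- head node: fold over children = A's one unfolding
        show (allwordsChildren M lst n seuil).foldl
            (fun res c => allwordsA M (c.2.1.toNat + 1) res c.1 c.2.1 c.2.2) res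
          = allwordsA M (n.toNat + 1) res lst n seuil
        rw [children_fuse]
        have hA : allwordsA M (n.toNat + 1) res lst n seuil
            = M.foldl (fun res me =>
                if pyMax me.2 = 0 then res
                else
                  let s2 := (List.range seuil.length).map (fun i => seuil.getD i 0 - me.2.getD i 0)
                  if pyMin s2 < 0 ∧ pyMax s2 = pyMax seuil then res
                  else allwordsA M n.toNat res (lst ++ [me.1]) (n-1) s2) res := by
          simp only [allwordsA, if_neg hbase]
        rw [hA]
        apply foldl_ext_mem
        intro acc me _
        have hnt : (n - 1).toNat + 1 = n.toNat := by omega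
        simp only [hnt]

-- ===== VERDICT (by name: the statement is the Claim_ definition above) =====
theorem allwords_spec : Claim_equal_allwords := by
  intro M res lst n seuil _ hpre
  obtain ⟨hs, hn, _, _⟩ := hpre
  unfold Spec_allwords allwords allwords_alt
  by_cases h0 : 0 ≤ n
  · have h := awB_spec M ((M.length + 1) ^ (n.toNat + 1) + 1) [(lst, n, seuil)] res
      (by intro c hc; simp only [List.mem_singleton] at hc; subst hc; exact h0)
      (by simp only [stackWt, nodeWt, List.map_cons, List.map_nil, List.sum_cons,
            List.sum_nil]; omega)
    rw [h]
    rfl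
  · -- n < 0, so Pre_ gives the immediate base case pyMax seuil ≤ 0
    have hb : pyMax seuil ≤ 0 := hn.resolve_left h0
    have hnt : n.toNat = 0 := by omega
    rw [hnt]
    have hA : allwordsA M 1 res lst n seuil = res ++ [lst] := by
      simp only [allwordsA, if_pos (Or.inl hb)]
    have hB : allwordsB M ((M.length + 1) ^ 1 + 1) res [(lst, n, seuil)] = res ++ [lst] := by
      have h1 : (M.length + 1) ^ 1 + 1 = (M.length + 1) + 1 := by ring_nf
      rw [h1]
      simp only [allwordsB, if_pos (Or.inl hb)]
    rw [hA, hB]
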